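-- pv_equiv track=rewrite | github.com/cheerfulconnor78/fpga-dnn-accelerator | top/weights_generator/mif_golden_f6.py | hardware_fc_layer
-- ===== SOURCE A (Python) =====
-- OUTPUT_SHIFT = 8
--
-- def hardware_fc_layer(input_vec, weights_flat, num_outputs):
--     """
--     Simulates the FPGA FC layer:
--     1. Dot Product
--     2. ReLU (Zero out negatives)
--     3. Shift (>> 8)
--     """
--     num_inputs = len(input_vec)
--     output_vec = []
--
--     # weights_flat is ordered: [Neuron0_In0...Neuron0_InN, Neuron1_In0...]
--
--     for i in range(num_outputs):
--         acc = 0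
--         # Slice weights for this neuron
--         start_idx = i * num_inputs
--         neuron_weights = weights_flat[start_idx : start_idx + num_inputs]
--
--         # Dot Product
--         for j in range(num_inputs):
--             acc += input_vec[j] * neuron_weights[j]
--
--         # Hardware Post-Processing
--         # 1. ReLU logic in your FPGA is applied AFTER shift?
--         # Wait, your code: "if (accumulator > 0) data_out <= accumulator >>> 8"
--         # This implies ReLU is done on the full accumulator.
--
--         if acc > 0:
--             res = acc >> OUTPUT_SHIFT
--         else:
--             res = 0
--
--         # Saturate to 8-bit signed (just in case, though usually 0-127 for ReLU)
--         if res > 127: res = 127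
--
--         output_vec.append(res)
--
--     return output_vec
-- ===== SOURCE B (Python) =====
-- OUTPUT_SHIFT = 8
--
-- def hardware_fc_layer(input_vec, weights_flat, num_outputs):
--     # Column-major accumulation: each input component is broadcast into all
--     # neurons' partial sums; post-processing (ReLU, >>8, saturate) runs once over accs.
--     n = max(num_outputs, 0)
--     num_inputs = len(input_vec)
--     accs = [0] * n
--     for j in range(num_inputs):
--         xj = input_vec[j]
--         for i in range(n):
--             accs[i] += xj * weights_flat[i * num_inputs + j]
--     output_vec = []
--     for acc in accs:
--         res = acc >> OUTPUT_SHIFT if acc > 0 else 0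
--         output_vec.append(127 if res > 127 else res)
--     return output_vec
-- ===== Notes on version B (the rewrite author's own statement) =====
-- stated objective: alternative
-- what changed: Dot products are accumulated column-major (outer loop over input components, inner over neurons, via explicit flat index i*num_inputs+j) instead of row-major with per-neuron weight slices; post-processing runs in a separate pass over the accumulators.
import Mathlib
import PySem

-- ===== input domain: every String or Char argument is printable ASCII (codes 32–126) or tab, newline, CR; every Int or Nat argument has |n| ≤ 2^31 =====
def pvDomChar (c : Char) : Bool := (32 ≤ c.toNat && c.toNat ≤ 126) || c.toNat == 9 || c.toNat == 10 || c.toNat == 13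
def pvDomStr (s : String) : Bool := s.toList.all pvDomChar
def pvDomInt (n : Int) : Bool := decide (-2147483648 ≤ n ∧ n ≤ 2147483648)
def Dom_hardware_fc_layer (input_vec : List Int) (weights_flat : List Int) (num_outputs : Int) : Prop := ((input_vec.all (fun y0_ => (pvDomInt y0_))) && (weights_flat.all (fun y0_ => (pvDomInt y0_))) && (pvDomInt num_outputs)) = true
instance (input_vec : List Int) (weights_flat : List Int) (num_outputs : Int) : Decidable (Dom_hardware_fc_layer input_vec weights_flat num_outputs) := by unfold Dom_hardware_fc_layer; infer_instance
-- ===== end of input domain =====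

-- B accumulates the dot products column-major (outer loop over input components) with the
-- explicit flat index i*num_inputs+j, then post-processes in a separate pass; same cost (alternative).
-- If A raises (IndexError on a too-short weights_flat), so does B; those inputs are excluded by Pre_.

-- ===== PORT A =====
-- Post-processing shared by both Pythons verbatim: ReLU on the accumulator, shift by 8, saturate.
-- Python's 'acc >> 8' on Int is Lean's 'acc >>> 8' (exact, per PySem).
def fcPost (acc : Int) : Int :=
  let res := if acc > 0 then acc >>> 8 else 0
  if res > 127 then 127 else res

def hardware_fc_layer (input_vec : List Int) (weights_flat : List Int) (num_outputs : Int) : List Int :=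
  let num_inputs : Int := input_vec.length
  (PySem.List.pyRange 0 num_outputs 1).foldl (fun output_vec i =>
    let start_idx := i * num_inputs
    let neuron_weights := PySem.List.slice weights_flat (some start_idx) (some (start_idx + num_inputs))
    let acc := (PySem.List.pyRange 0 num_inputs 1).foldl
      (fun acc j => acc + PySem.List.pyGetD input_vec j 0 * PySem.List.pyGetD neuron_weights j 0) 0
    output_vec ++ [fcPost acc]) []

-- ===== PORT B =====
def hardware_fc_layer_alt (input_vec : List Int) (weights_flat : List Int) (num_outputs : Int) : List Int :=
  let n : Nat := (max num_outputs 0).toNat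
  let num_inputs : Nat := input_vec.length
  let accs := (List.range num_inputs).foldl (fun accs j =>
      let xj := input_vec.getD j 0
      accs.mapIdx (fun i a => a + xj * PySem.List.pyGetD weights_flat ((i : Int) * (num_inputs : Int) + (j : Int)) 0))
    (List.replicate n (0 : Int))
  accs.map fcPost

-- ===== PRECONDITION & SPEC =====
-- Pre_ excludes exactly the inputs where Python A raises IndexError (weights_flat shorter than
-- num_outputs * len(input_vec) with both positive); B raises the same IndexError there.
def Pre_hardware_fc_layer (input_vec : List Int) (weights_flat : List Int) (num_outputs : Int) : Prop :=
  num_outputs ≤ 0 ∨ input_vec = [] ∨ num_outputs * (input_vec.length : Int) ≤ (weights_flat.length : Int)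
instance (input_vec : List Int) (weights_flat : List Int) (num_outputs : Int) : Decidable (Pre_hardware_fc_layer input_vec weights_flat num_outputs) := by unfold Pre_hardware_fc_layer; infer_instance
def pvWitness_hardware_fc_layer : List Int × List Int × Int := ([3, -1], [256, 512, -4, 1000], 2)

def Spec_hardware_fc_layer (input_vec : List Int) (weights_flat : List Int) (num_outputs : Int) (out : List Int) : Prop := out = hardware_fc_layer_alt input_vec weights_flat num_outputs
instance (input_vec : List Int) (weights_flat : List Int) (num_outputs : Int) (out : List Int) : Decidable (Spec_hardware_fc_layer input_vec weights_flat num_outputs out) := by unfold Spec_hardware_fc_layer; infer_instance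

-- ===== CLAIM (what is proved, stated in full; the proofs are below) =====
def Claim_equal_hardware_fc_layer : Prop := ∀ (input_vec : List Int) (weights_flat : List Int) (num_outputs : Int), Dom_hardware_fc_layer input_vec weights_flat num_outputs → Pre_hardware_fc_layer input_vec weights_flat num_outputs → Spec_hardware_fc_layer input_vec weights_flat num_outputs (hardware_fc_layer input_vec weights_flat num_outputs)

-- ===== LEMMAS AND PROOFS =====

-- the reference value: neuron i's dot product with flat indexing, out-of-range reads as 0
def fcDot (iv wf : List Int) (i : Nat) : Int :=
  ((List.range iv.length).map (fun j => iv.getD j 0 * wf.getD (i * iv.length + j) 0)).sum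

-- mapIdx over a map of range is a map of range
theorem mapIdx_map_range {α : Type} (n : Nat) (g : Nat → α) (f : Nat → α → α) :
    List.mapIdx f ((List.range n).map g) = (List.range n).map (fun i => f i (g i)) := by
  apply List.ext_getElem
  · simp
  · intro k h1 h2
    simp [List.getElem_mapIdx]

-- A's per-neuron inner loop computes fcDot (k-th neuron), for any weights list
theorem accA_eq_fcDot (iv wf : List Int) (k : Nat) :
    (PySem.List.pyRange 0 (iv.length : Int) 1).foldl
      (fun acc j => acc + PySem.List.pyGetD iv j 0 *
        PySem.List.pyGetD (PySem.List.slice wf (some ((k : Int) * (iv.length : Int)))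
          (some ((k : Int) * (iv.length : Int) + (iv.length : Int)))) j 0) 0
    = fcDot iv wf k := by
  have hsl : PySem.List.slice wf (some ((k : Int) * (iv.length : Int)))
      (some ((k : Int) * (iv.length : Int) + (iv.length : Int)))
      = (wf.drop (k * iv.length)).take iv.length := by
    have : ((k : Int) * (iv.length : Int)) = ((k * iv.length : Nat) : Int) := by push_cast; ring
    rw [this, PySem.List.slice_natCast_add]
  rw [hsl, PySem.List.foldl_add, PySem.List.pyRange_one]
  unfold fcDot
  simp only [Int.sub_zero, Int.toNat_natCast, List.map_map, zero_add]
  congr 1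
  apply List.map_congr_left
  intro j hj
  rw [List.mem_range] at hj
  simp only [Function.comp_apply, PySem.List.pyGetD_natCast]
  congr 1
  -- ((wf.drop (k*len)).take len).getD j 0 = wf.getD (k*len + j) 0
  rw [List.getD_eq_getElem?_getD, List.getD_eq_getElem?_getD,
      List.getElem?_take_of_lt hj, List.getElem?_drop]

-- partial column-major sums after the first m input components
def fcPartial (iv wf : List Int) (m i : Nat) : Int :=
  ((List.range m).map (fun j => iv.getD j 0 * wf.getD (i * iv.length + j) 0)).sum

-- B's column loop invariant
theorem accsB_inv (iv wf : List Int) (n m : Nat) :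
    (List.range m).foldl (fun accs j =>
        accs.mapIdx (fun i a => a + iv.getD j 0 *
          PySem.List.pyGetD wf ((i : Int) * (iv.length : Int) + (j : Int)) 0))
      (List.replicate n (0 : Int))
    = (List.range n).map (fun i => fcPartial iv wf m i) := by
  induction m with
  | zero => simp [fcPartial]
  | succ m ih =>
    rw [List.range_succ, List.foldl_append, List.foldl_cons, List.foldl_nil, ih,
        mapIdx_map_range]
    apply List.map_congr_left
    intro i _
    have : ((i : Int) * (iv.length : Int) + (m : Int)) = ((i * iv.length + m : Nat) : Int) := by
      push_cast; ring
    rw [this, PySem.List.pyGetD_natCast]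
    simp [fcPartial, List.range_succ]

-- normal forms
theorem portA_nf (iv wf : List Int) (no : Int) :
    hardware_fc_layer iv wf no
      = (List.range no.toNat).map (fun k => fcPost (fcDot iv wf k)) := by
  unfold hardware_fc_layer
  rw [PySem.List.foldl_append_singleton_eq_map, PySem.List.pyRange_one 0 no]
  simp only [Int.sub_zero, List.map_map, List.nil_append]
  apply List.map_congr_left
  intro k _
  simp only [Function.comp_apply, zero_add]
  rw [accA_eq_fcDot]

theorem portB_nf (iv wf : List Int) (no : Int) :
    hardware_fc_layer_alt iv wf no
      = (List.range no.toNat).map (fun k => fcPost (fcDot iv wf k)) := by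
  have hn : (max no 0).toNat = no.toNat := by omega
  simp only [hardware_fc_layer_alt]
  rw [hn, accsB_inv iv wf no.toNat iv.length, List.map_map]
  apply List.map_congr_left
  intro k _
  simp [Function.comp_apply, fcPartial, fcDot]

-- ===== VERDICT (by name: the statement is the Claim_ definition above) =====
theorem hardware_fc_layer_spec : Claim_equal_hardware_fc_layer := by
  intro iv wf no _dom _pre
  unfold Spec_hardware_fc_layer
  rw [portA_nf, portB_nf]
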